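-- pv_equiv track=rewrite | github.com/NanayaHaruki/leetcode | 序号/980. Unique Paths III.py | uniquePathsIII
-- ===== SOURCE A (Python) =====
-- from typing import List
--
-- def uniquePathsIII(grid: List[List[int]]) -> int:
--     sx,sy,totalLeft=0,0,0
--     m,n=len(grid),len(grid[0])
--     dirs=(-1,0,1,0,-1)
--     for i in range(m):
--         for j in range(n):
--             if grid[i][j]==1:
--                 sx,sy=i,j
--             elif grid[i][j]==0:
--                 totalLeft+=1
--     def dfs(i,j,left):
--         # 以i，j为起点，还需要走过left个格子，并且能走到终点的路线有几条
--         if i<0 or i>=m or j<0 or j>=n or grid[i][j]==-1: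
--             return 0 # 越界了，或 走到死路了
--         if grid[i][j]==2:
--             return 0 if left>0 else 1
--         grid[i][j]=-1
--         ans=0
--         for d in range(4):
--             dx,dy=dirs[d],dirs[d+1]
--             ans+=dfs(i+dx,j+dy,left-1)
--         grid[i][j]=0
--         return ans
--     return dfs(sx,sy,totalLeft+1)
-- ===== SOURCE B (Python) =====
-- from typing import List
--
-- def uniquePathsIII(grid: List[List[int]]) -> int:
--     # Bitmask DP with memoization over (cell, visited-set) instead of exponential
--     # backtracking; does not mutate grid (A temporarily marks cells and restores them to 0).
--     m, n = len(grid), len(grid[0])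
--     sx = sy = 0
--     need = 1
--     cells = []
--     index = {}
--     for i in range(m):
--         for j in range(n):
--             v = grid[i][j]
--             if v == 1:
--                 sx, sy = i, j
--             elif v == 0:
--                 need += 1
--             if v != -1 and v != 2:
--                 index[(i, j)] = len(cells)
--                 cells.append((i, j))
--     s = index.get((sx, sy))
--     if s is None:
--         return 0
--     memo = {}
--     def f(c, mask, left):
--         key = (c, mask)
--         if key in memo:
--             return memo[key]
--         i, j = cells[c]
--         total = 0
--         for di, dj in ((-1, 0), (0, 1), (1, 0), (0, -1)):
--             ni, nj = i + di, j + dj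
--             if 0 <= ni < m and 0 <= nj < n:
--                 v = grid[ni][nj]
--                 if v == 2:
--                     if left <= 1:
--                         total += 1
--                 else:
--                     t = index.get((ni, nj))
--                     if t is not None and not mask >> t & 1:
--                         total += f(t, mask | 1 << t, left - 1)
--         memo[key] = total
--         return total
--     return f(s, 1 << s, need)
-- ===== Notes on version B (the rewrite author's own statement) =====
-- stated objective: alternative
-- what changed: A's exponential backtracking DFS that temporarily mutates the grid (mark -1 / restore 0) is replaced by a memoized bitmask dynamic program over (current cell, visited-set) states on an index of the walkable cells built in one scan; B does not mutate its argument.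
import Mathlib
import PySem

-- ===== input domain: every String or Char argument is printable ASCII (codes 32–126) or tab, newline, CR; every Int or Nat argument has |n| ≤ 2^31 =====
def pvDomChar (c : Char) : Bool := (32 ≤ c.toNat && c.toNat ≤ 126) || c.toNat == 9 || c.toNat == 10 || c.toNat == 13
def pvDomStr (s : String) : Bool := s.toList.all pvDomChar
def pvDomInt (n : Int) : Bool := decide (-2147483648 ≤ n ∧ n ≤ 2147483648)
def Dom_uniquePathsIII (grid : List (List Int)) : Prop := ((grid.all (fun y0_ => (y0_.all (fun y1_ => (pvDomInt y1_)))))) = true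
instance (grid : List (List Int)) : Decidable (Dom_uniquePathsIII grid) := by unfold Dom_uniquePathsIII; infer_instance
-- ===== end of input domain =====

-- B replaces A's exponential backtracking (which temporarily mutates the grid) by a
-- memoized bitmask DP over (cell, visited-set); equivalence is about the RETURN value
-- only: Python A mutates its argument (visited cells are restored as 0, so a 1 — or any
-- other walkable value — ends up as 0), B does not.

-- ===== PORT A =====
-- grid[i][j] (both ports; only evaluated at nonnegative in-range indices)
def cellZ (g : List (List Int)) (i j : Int) : Int := (g.getD i.toNat []).getD j.toNat 0

-- grid[i][j] = v (only at nonnegative in-range indices)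
def setCellA (g : List (List Int)) (i j v : Int) : List (List Int) :=
  g.set i.toNat ((g.getD i.toNat []).set j.toNat v)

def dirsA : List Int := [-1, 0, 1, 0, -1]

-- A's dfs; the mutated grid is threaded through and returned; fuel only makes the
-- recursion total (never exhausted when called with fuel > number of cells)
def dfsA (m n : Int) (fuel : Nat) (g : List (List Int)) (i j left : Int) :
    Int × List (List Int) :=
  match fuel with
  | 0 => (0, g)
  | fuel + 1 =>
    if i < 0 ∨ m ≤ i ∨ j < 0 ∨ n ≤ j ∨ cellZ g i j = -1 then (0, g)
    else if cellZ g i j = 2 then ((if 0 < left then (0:Int) else 1), g)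
    else
      let g1 := setCellA g i j (-1)
      let r := (List.range 4).foldl (fun (s : Int × List (List Int)) d =>
          let dx := dirsA.getD d 0
          let dy := dirsA.getD (d+1) 0
          let p := dfsA m n fuel s.2 (i+dx) (j+dy) (left-1)
          (s.1 + p.1, p.2)) (0, g1)
      (r.1, setCellA r.2 i j 0)

-- the body of A's scanning double loop
def scanStepA (grid : List (List Int)) (s : Int × Int × Int) (i j : Nat) : Int × Int × Int :=
  let v := cellZ grid i j
  if v = 1 then ((i : Int), (j : Int), s.2.2)
  else if v = 0 then (s.1, s.2.1, s.2.2 + 1)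
  else s

def uniquePathsIII (grid : List (List Int)) : Int :=
  let m : Int := grid.length
  let n : Int := (grid.headD []).length
  let st := (List.range grid.length).foldl (fun s i =>
      (List.range (grid.headD []).length).foldl (fun s j => scanStepA grid s i j) s)
    ((0:Int), (0:Int), (0:Int))
  (dfsA m n (grid.length * (grid.headD []).length + 1) grid st.1 st.2.1 (st.2.2 + 1)).1

-- ===== PORT B =====
def dirListB : List (Int × Int) := [(-1,0),(0,1),(1,0),(0,-1)]

-- the single scan collecting start, need, the walkable cells and their dict of indices
-- the body of B's scanning double loop
def scanStepB (grid : List (List Int))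
    (s : Int × Int × Int × List (Int × Int) × PySem.Dict (Int × Int) Int) (i j : Nat) :
    Int × Int × Int × List (Int × Int) × PySem.Dict (Int × Int) Int :=
  let v := cellZ grid i j
  let sx := if v = 1 then (i : Int) else s.1
  let sy := if v = 1 then (j : Int) else s.2.1
  let need := if v = 1 then s.2.2.1 else if v = 0 then s.2.2.1 + 1 else s.2.2.1
  if v ≠ -1 ∧ v ≠ 2 then
    (sx, sy, need, s.2.2.2.1 ++ [((i:Int),(j:Int))],
     s.2.2.2.2.insert ((i:Int),(j:Int)) (s.2.2.2.1.length : Int))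
  else (sx, sy, need, s.2.2.2.1, s.2.2.2.2)

def scanB (grid : List (List Int)) :
    Int × Int × Int × List (Int × Int) × PySem.Dict (Int × Int) Int :=
  (List.range grid.length).foldl (fun s i =>
    (List.range (grid.headD []).length).foldl (fun s j => scanStepB grid s i j) s)
    ((0:Int), (0:Int), (1:Int), ([] : List (Int × Int)), PySem.Dict.empty)

-- B's memoized dfs; mask is Python's visited-bitmask int, always nonnegative, kept as a
-- Nat so that `mask >> t & 1` is `Nat.testBit`; fuel only makes the recursion total
-- the body of B's for-loop over the four directions (rec = the recursive call)
def fBbody (grid : List (List Int)) (m n : Int) (index : PySem.Dict (Int × Int) Int)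
    (rec : PySem.Dict (Int × Nat) Int → Int → Nat → Int → Int × PySem.Dict (Int × Nat) Int)
    (ij : Int × Int) (mask : Nat) (left : Int)
    (s : Int × PySem.Dict (Int × Nat) Int) (d : Int × Int) :
    Int × PySem.Dict (Int × Nat) Int :=
  let ni := ij.1 + d.1
  let nj := ij.2 + d.2
  if 0 ≤ ni ∧ ni < m ∧ 0 ≤ nj ∧ nj < n then
    let v := cellZ grid ni nj
    if v = 2 then (if left ≤ 1 then (s.1 + 1, s.2) else s)
    else
      match index.get? (ni, nj) with
      | some t =>
        if mask.testBit t.toNat then s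
        else
          let p := rec s.2 t (mask ||| (1 <<< t.toNat)) (left - 1)
          (s.1 + p.1, p.2)
      | none => s
  else s

def fB (grid : List (List Int)) (m n : Int) (cells : List (Int × Int))
    (index : PySem.Dict (Int × Int) Int) (fuel : Nat)
    (memo : PySem.Dict (Int × Nat) Int) (c : Int) (mask : Nat) (left : Int) :
    Int × PySem.Dict (Int × Nat) Int :=
  match fuel with
  | 0 => (0, memo)
  | fuel + 1 =>
    match memo.get? (c, mask) with
    | some v => (v, memo)
    | none =>
      let ij := cells.getD c.toNat (0, 0)
      let r := dirListB.foldl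
        (fBbody grid m n index (fB grid m n cells index fuel) ij mask left) (0, memo)
      (r.1, r.2.insert (c, mask) r.1)

def uniquePathsIII_alt (grid : List (List Int)) : Int :=
  let m : Int := grid.length
  let n : Int := (grid.headD []).length
  let s := scanB grid
  match s.2.2.2.2.get? (s.1, s.2.1) with
  | none => 0
  | some st =>
    (fB grid m n s.2.2.2.1 s.2.2.2.2 (s.2.2.2.1.length + 1)
      PySem.Dict.empty st (1 <<< st.toNat) s.2.2.1).1

-- ===== PRECONDITION & SPEC =====
-- Pre_ excludes exactly the inputs where Python A raises (IndexError): the empty grid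
-- (grid[0]) and grids with a row shorter than the first row (grid[i][j], j < len(grid[0]))
def Pre_uniquePathsIII (grid : List (List Int)) : Prop :=
  grid ≠ [] ∧ ∀ row ∈ grid, (grid.headD []).length ≤ row.length
instance (grid : List (List Int)) : Decidable (Pre_uniquePathsIII grid) := by
  unfold Pre_uniquePathsIII; infer_instance

def pvWitness_uniquePathsIII : List (List Int) := [[1, 0], [0, 2]]

def Spec_uniquePathsIII (grid : List (List Int)) (out : Int) : Prop := out = uniquePathsIII_alt grid
instance (grid : List (List Int)) (out : Int) : Decidable (Spec_uniquePathsIII grid out) := by unfold Spec_uniquePathsIII; infer_instance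

-- ===== CLAIM (what is proved, stated in full; the proofs are below) =====
def Claim_equal_uniquePathsIII : Prop := ∀ (grid : List (List Int)), Dom_uniquePathsIII grid → Pre_uniquePathsIII grid → Spec_uniquePathsIII grid (uniquePathsIII grid)

-- ===== LEMMAS AND PROOFS =====

-- ---- the common specification: pure recursion F over the visited SET ----

noncomputable def walkSet (grid : List (List Int)) (m n : Int) : Finset (Int × Int) :=
  ((Finset.Icc 0 (m-1)) ×ˢ (Finset.Icc 0 (n-1))).filter
    (fun p => cellZ grid p.1 p.2 ≠ -1 ∧ cellZ grid p.1 p.2 ≠ 2)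

lemma mem_walkSet {grid : List (List Int)} {m n i j : Int}
    (h1 : ¬(i < 0 ∨ m ≤ i ∨ j < 0 ∨ n ≤ j))
    (h2 : cellZ grid i j ≠ -1) (h3 : cellZ grid i j ≠ 2) :
    (i, j) ∈ walkSet grid m n := by
  simp only [walkSet, Finset.mem_filter, Finset.mem_product, Finset.mem_Icc]
  refine ⟨⟨⟨?_, ?_⟩, ?_, ?_⟩, h2, h3⟩ <;> omega

lemma F_dec {grid : List (List Int)} {m n : Int} {V : Finset (Int × Int)} {i j : Int}
    (h1 : ¬(i < 0 ∨ m ≤ i ∨ j < 0 ∨ n ≤ j))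
    (h2 : ¬(cellZ grid i j = -1 ∨ (i, j) ∈ V))
    (h3 : ¬cellZ grid i j = 2) :
    (walkSet grid m n \ insert (i, j) V).card < (walkSet grid m n \ V).card := by
  push Not at h2
  have hmem : (i, j) ∈ walkSet grid m n \ V := by
    exact Finset.mem_sdiff.mpr ⟨mem_walkSet h1 h2.1 h3, h2.2⟩
  rw [Finset.sdiff_insert]
  exact Finset.card_erase_lt_of_mem hmem

noncomputable def F (grid : List (List Int)) (m n : Int) (V : Finset (Int × Int)) (i j left : Int) : Int :=
  if h1 : i < 0 ∨ m ≤ i ∨ j < 0 ∨ n ≤ j then 0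
  else if h2 : cellZ grid i j = -1 ∨ (i, j) ∈ V then 0
  else if h3 : cellZ grid i j = 2 then (if 0 < left then 0 else 1)
  else
    F grid m n (insert (i,j) V) (i-1) j (left-1) + F grid m n (insert (i,j) V) i (j+1) (left-1) +
    F grid m n (insert (i,j) V) (i+1) j (left-1) + F grid m n (insert (i,j) V) i (j-1) (left-1)
termination_by (walkSet grid m n \ V).card
decreasing_by all_goals exact F_dec h1 h2 h3

lemma F_out {grid : List (List Int)} {m n : Int} {V : Finset (Int × Int)} {i j left : Int}
    (h : i < 0 ∨ m ≤ i ∨ j < 0 ∨ n ≤ j) : F grid m n V i j left = 0 := by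
  rw [F]; simp [h]

lemma F_blocked {grid : List (List Int)} {m n : Int} {V : Finset (Int × Int)} {i j left : Int}
    (h : cellZ grid i j = -1 ∨ (i, j) ∈ V) : F grid m n V i j left = 0 := by
  rw [F]; split_ifs <;> simp_all

lemma F_two {grid : List (List Int)} {m n : Int} {V : Finset (Int × Int)} {i j left : Int}
    (h1 : ¬(i < 0 ∨ m ≤ i ∨ j < 0 ∨ n ≤ j))
    (h2 : ¬(cellZ grid i j = -1 ∨ (i, j) ∈ V))
    (h3 : cellZ grid i j = 2) :
    F grid m n V i j left = (if 0 < left then 0 else 1) := by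
  rw [F]; split_ifs <;> simp_all

lemma F_step {grid : List (List Int)} {m n : Int} {V : Finset (Int × Int)} {i j left : Int}
    (h1 : ¬(i < 0 ∨ m ≤ i ∨ j < 0 ∨ n ≤ j))
    (h2 : ¬(cellZ grid i j = -1 ∨ (i, j) ∈ V))
    (h3 : ¬cellZ grid i j = 2) :
    F grid m n V i j left =
      F grid m n (insert (i,j) V) (i-1) j (left-1) + F grid m n (insert (i,j) V) i (j+1) (left-1) +
      F grid m n (insert (i,j) V) (i+1) j (left-1) + F grid m n (insert (i,j) V) i (j-1) (left-1) := by
  rw [F]; split_ifs <;> simp_all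

-- ---- A-side: the mutated grid tracked as a visited set ----

lemma length_setCellA (g : List (List Int)) (i j v : Int) :
    (setCellA g i j v).length = g.length := List.length_set ..

lemma getD_setCellA_ne (g : List (List Int)) {i : Int} (j v : Int) {r : Nat}
    (h : r ≠ i.toNat) : (setCellA g i j v).getD r [] = g.getD r [] := by
  unfold setCellA
  rw [List.getD_eq_getElem?_getD, List.getD_eq_getElem?_getD,
    List.getElem?_set_ne (by omega), ← List.getD_eq_getElem?_getD]

lemma getD_setCellA_self (g : List (List Int)) {i : Int} (j v : Int)
    (h : i.toNat < g.length) :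
    (setCellA g i j v).getD i.toNat [] = (g.getD i.toNat []).set j.toNat v := by
  unfold setCellA
  rw [List.getD_eq_getElem?_getD, List.getElem?_set_self (by omega)]
  rfl

lemma rowlen_setCellA (g : List (List Int)) (i j v : Int) (r : Nat) :
    ((setCellA g i j v).getD r []).length = (g.getD r []).length := by
  by_cases h : r = i.toNat
  · subst h
    by_cases hl : i.toNat < g.length
    · rw [getD_setCellA_self g j v hl, List.length_set]
    · unfold setCellA
      rw [List.set_eq_of_length_le (by omega)]
  · rw [getD_setCellA_ne g j v h]

lemma cellZ_setCellA_self (g : List (List Int)) {i j : Int} (v : Int)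
    (hi : i.toNat < g.length) (hj : j.toNat < (g.getD i.toNat []).length) :
    cellZ (setCellA g i j v) i j = v := by
  unfold cellZ
  rw [getD_setCellA_self g j v hi, List.getD_eq_getElem?_getD,
    List.getElem?_set_self (by omega)]
  rfl

lemma cellZ_setCellA_ne (g : List (List Int)) {i j i' j' : Int} (v : Int)
    (hi : 0 ≤ i) (hj : 0 ≤ j) (hi' : 0 ≤ i') (hj' : 0 ≤ j')
    (hne : (i', j') ≠ (i, j)) :
    cellZ (setCellA g i j v) i' j' = cellZ g i' j' := by
  by_cases hr : i'.toNat = i.toNat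
  · have hjj : j'.toNat ≠ j.toNat := by
      have hne' : ¬(i' = i ∧ j' = j) := fun h => hne (by rw [h.1, h.2])
      omega
    unfold cellZ
    rw [hr]
    by_cases hl : i.toNat < g.length
    · rw [getD_setCellA_self g j v hl, List.getD_eq_getElem?_getD,
        List.getD_eq_getElem?_getD, List.getElem?_set_ne (by omega),
        ← List.getD_eq_getElem?_getD]
    · unfold setCellA
      rw [List.set_eq_of_length_le (by omega)]
  · unfold cellZ
    rw [getD_setCellA_ne g j v hr]

def RelG (grid g : List (List Int)) (m n : Int) (V : Finset (Int × Int)) : Prop :=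
  g.length = grid.length ∧
  (∀ r : Nat, (g.getD r []).length = (grid.getD r []).length) ∧
  ∀ i j : Int, 0 ≤ i → i < m → 0 ≤ j → j < n →
    ((i, j) ∈ V → cellZ g i j = -1) ∧
    ((i, j) ∉ V →
      ((cellZ g i j = -1 ↔ cellZ grid i j = -1) ∧ (cellZ g i j = 2 ↔ cellZ grid i j = 2)))

lemma RelG_mark (grid g : List (List Int)) (m n : Int) (V : Finset (Int × Int)) {i j : Int}
    (hm : m = (grid.length : Int))
    (hrows : ∀ r : Nat, r < grid.length → n ≤ ((grid.getD r []).length : Int))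
    (hrel : RelG grid g m n V)
    (hin : ¬(i < 0 ∨ m ≤ i ∨ j < 0 ∨ n ≤ j)) :
    RelG grid (setCellA g i j (-1)) m n (insert (i, j) V) := by
  obtain ⟨hlen, hrow, hcell⟩ := hrel
  have hi : i.toNat < g.length := by omega
  have hjr : j.toNat < (g.getD i.toNat []).length := by
    have := hrows i.toNat (by omega)
    have := hrow i.toNat
    omega
  refine ⟨by rw [length_setCellA]; exact hlen,
    fun r => by rw [rowlen_setCellA]; exact hrow r, ?_⟩
  intro a b ha hb hc hd
  by_cases he : (a, b) = (i, j)
  · have h1 : a = i := (Prod.ext_iff.mp he).1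
    have h2 : b = j := (Prod.ext_iff.mp he).2
    subst h1; subst h2
    constructor
    · intro _
      exact cellZ_setCellA_self g (-1) hi hjr
    · intro hab
      exact absurd (Finset.mem_insert_self _ _) hab
  · rw [cellZ_setCellA_ne g (-1) (by omega) (by omega) ha hc he]
    constructor
    · intro hab
      rcases Finset.mem_insert.mp hab with h | h
      · exact absurd h he
      · exact (hcell a b ha hb hc hd).1 h
    · intro hab
      exact (hcell a b ha hb hc hd).2 (fun h => hab (Finset.mem_insert_of_mem h))

lemma RelG_unmark (grid g : List (List Int)) (m n : Int) (V : Finset (Int × Int)) {i j : Int}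
    (hm : m = (grid.length : Int))
    (hrows : ∀ r : Nat, r < grid.length → n ≤ ((grid.getD r []).length : Int))
    (hrel : RelG grid g m n (insert (i, j) V))
    (hin : ¬(i < 0 ∨ m ≤ i ∨ j < 0 ∨ n ≤ j))
    (hnot : (i, j) ∉ V)
    (hw1 : cellZ grid i j ≠ -1) (hw2 : cellZ grid i j ≠ 2) :
    RelG grid (setCellA g i j 0) m n V := by
  obtain ⟨hlen, hrow, hcell⟩ := hrel
  have hi : i.toNat < g.length := by omega
  have hjr : j.toNat < (g.getD i.toNat []).length := by
    have := hrows i.toNat (by omega)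
    have := hrow i.toNat
    omega
  refine ⟨by rw [length_setCellA]; exact hlen,
    fun r => by rw [rowlen_setCellA]; exact hrow r, ?_⟩
  intro a b ha hb hc hd
  by_cases he : (a, b) = (i, j)
  · have h1 : a = i := (Prod.ext_iff.mp he).1
    have h2 : b = j := (Prod.ext_iff.mp he).2
    subst h1; subst h2
    rw [cellZ_setCellA_self g 0 hi hjr]
    constructor
    · intro hab
      exact absurd hab hnot
    · intro _
      constructor
      · constructor
        · intro h; exact absurd h (by norm_num)
        · intro h; exact absurd h hw1
      · constructor
        · intro h; exact absurd h (by norm_num)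
        · intro h; exact absurd h hw2
  · rw [cellZ_setCellA_ne g 0 (by omega) (by omega) ha hc he]
    constructor
    · intro hab
      exact (hcell a b ha hb hc hd).1 (Finset.mem_insert_of_mem hab)
    · intro hab
      refine (hcell a b ha hb hc hd).2 ?_
      intro hmem
      rcases Finset.mem_insert.mp hmem with h | h
      · exact he h
      · exact hab h

lemma dfsA_succ {m n : Int} {fuel : Nat} {g : List (List Int)} {i j left : Int}
    (h1 : ¬(i < 0 ∨ m ≤ i ∨ j < 0 ∨ n ≤ j ∨ cellZ g i j = -1))
    (h2 : ¬cellZ g i j = 2) :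
    dfsA m n (fuel+1) g i j left =
      (let g1 := setCellA g i j (-1)
       let p1 := dfsA m n fuel g1 (i-1) j (left-1)
       let p2 := dfsA m n fuel p1.2 i (j+1) (left-1)
       let p3 := dfsA m n fuel p2.2 (i+1) j (left-1)
       let p4 := dfsA m n fuel p3.2 i (j-1) (left-1)
       (p1.1 + p2.1 + p3.1 + p4.1, setCellA p4.2 i j 0)) := by
  conv_lhs => rw [dfsA]
  rw [if_neg h1, if_neg h2]
  have h4 : List.range 4 = [0, 1, 2, 3] := by decide
  rw [h4]
  simp only [List.foldl_cons, List.foldl_nil, dirsA, List.getD, List.getElem?_cons_zero,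
    List.getElem?_cons_succ, Option.getD_some, zero_add, add_zero]
  rw [show i + -1 = i - 1 from by ring, show j + -1 = j - 1 from by ring]

lemma dfsA_eq (grid : List (List Int)) (m n : Int)
    (hm : m = (grid.length : Int))
    (hrows : ∀ r : Nat, r < grid.length → n ≤ ((grid.getD r []).length : Int)) :
    ∀ (fuel : Nat) (V : Finset (Int × Int)) (g : List (List Int)) (i j left : Int),
      RelG grid g m n V → (walkSet grid m n \ V).card < fuel →
      (dfsA m n fuel g i j left).1 = F grid m n V i j left ∧
      RelG grid (dfsA m n fuel g i j left).2 m n V := by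
  intro fuel
  induction fuel with
  | zero => intro V g i j left _ hcard; omega
  | succ fuel ih =>
    intro V g i j left hrel hcard
    by_cases hb : i < 0 ∨ m ≤ i ∨ j < 0 ∨ n ≤ j ∨ cellZ g i j = -1
    · rw [dfsA, if_pos hb]
      refine ⟨?_, hrel⟩
      by_cases hr : i < 0 ∨ m ≤ i ∨ j < 0 ∨ n ≤ j
      · rw [F_out hr]
      · have hneg : cellZ g i j = -1 := by tauto
        by_cases hv : (i, j) ∈ V
        · rw [F_blocked (Or.inr hv)]
        · have := ((hrel.2.2 i j (by omega) (by omega) (by omega) (by omega)).2 hv).1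
          rw [F_blocked (Or.inl (this.mp hneg))]
    · have hr : ¬(i < 0 ∨ m ≤ i ∨ j < 0 ∨ n ≤ j) := by tauto
      have hneg : cellZ g i j ≠ -1 := by tauto
      have hnv : (i, j) ∉ V := fun hv =>
        hneg ((hrel.2.2 i j (by omega) (by omega) (by omega) (by omega)).1 hv)
      have hiff := (hrel.2.2 i j (by omega) (by omega) (by omega) (by omega)).2 hnv
      have hgneg : cellZ grid i j ≠ -1 := fun h => hneg (hiff.1.mpr h)
      by_cases h2 : cellZ g i j = 2
      · rw [dfsA, if_neg hb, if_pos h2]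
        exact ⟨(F_two hr (by push Not; exact ⟨hgneg, hnv⟩) (hiff.2.mp h2)).symm, hrel⟩
      · have hg2 : cellZ grid i j ≠ 2 := fun h => h2 (hiff.2.mpr h)
        have hnb : ¬(cellZ grid i j = -1 ∨ (i, j) ∈ V) := by tauto
        rw [dfsA_succ hb h2]
        have hrel1 : RelG grid (setCellA g i j (-1)) m n (insert (i, j) V) :=
          RelG_mark grid g m n V hm hrows hrel hr
        have hcard' : (walkSet grid m n \ insert (i, j) V).card < fuel := by
          have := F_dec (grid := grid) (m := m) (n := n) hr hnb hg2
          omega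
        obtain ⟨e1, r1⟩ := ih (insert (i, j) V) _ (i-1) j (left-1) hrel1 hcard'
        obtain ⟨e2, r2⟩ := ih (insert (i, j) V) _ i (j+1) (left-1) r1 hcard'
        obtain ⟨e3, r3⟩ := ih (insert (i, j) V) _ (i+1) j (left-1) r2 hcard'
        obtain ⟨e4, r4⟩ := ih (insert (i, j) V) _ i (j-1) (left-1) r3 hcard'
        constructor
        · simp only []
          rw [e1, e2, e3, e4, F_step hr hnb hg2]
        · simp only []
          exact RelG_unmark grid _ m n V hm hrows r4 hr hnv hgneg hg2

-- ---- B-side: the scan, and the memoized bitmask DP against F ----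

def castp (p : Nat × Nat) : Int × Int := ((p.1 : Int), (p.2 : Int))

def pairsL (m' n' : Nat) : List (Nat × Nat) :=
  (List.range m').flatMap (fun i => (List.range n').map (fun j => (i, j)))

lemma mem_pairsL {m' n' : Nat} {p : Nat × Nat} :
    p ∈ pairsL m' n' ↔ p.1 < m' ∧ p.2 < n' := by
  unfold pairsL
  constructor
  · intro h
    obtain ⟨i, hi, hp⟩ := List.mem_flatMap.mp h
    obtain ⟨j, hj, he⟩ := List.mem_map.mp hp
    subst he
    exact ⟨List.mem_range.mp hi, List.mem_range.mp hj⟩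
  · intro ⟨h1, h2⟩
    exact List.mem_flatMap.mpr ⟨p.1, List.mem_range.mpr h1,
      List.mem_map.mpr ⟨p.2, List.mem_range.mpr h2, rfl⟩⟩

lemma pairsL_nodup (m' n' : Nat) : (pairsL m' n').Nodup := by
  induction m' with
  | zero => simp [pairsL]
  | succ k ih =>
    unfold pairsL at *
    rw [List.range_succ, List.flatMap_append]
    simp only [List.flatMap_cons, List.flatMap_nil, List.append_nil]
    refine List.Nodup.append ih ?_ ?_
    · exact List.Nodup.map (fun a b h => (Prod.ext_iff.mp h).2) (List.nodup_range)
    · intro a ha hb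
      have h1 : a.1 < k := (mem_pairsL.mp ha).1
      obtain ⟨j, _, he⟩ := List.mem_map.mp hb
      rw [← he] at h1
      omega

lemma castp_inj : Function.Injective castp := by
  intro a b h
  simp only [castp, Prod.mk.injEq, Nat.cast_inj] at h
  exact Prod.ext_iff.mpr h

lemma foldl_nested {σ : Type} (f : σ → Nat → Nat → σ) (m' n' : Nat) (init : σ) :
    (List.range m').foldl (fun s i => (List.range n').foldl (fun s j => f s i j) s) init
      = (pairsL m' n').foldl (fun s p => f s p.1 p.2) init := by
  unfold pairsL
  rw [List.foldl_flatMap]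
  simp only [List.foldl_map]

def stepA (grid : List (List Int)) (s : Int × Int × Int) (p : Nat × Nat) : Int × Int × Int :=
  if cellZ grid p.1 p.2 = 1 then ((p.1 : Int), (p.2 : Int), s.2.2)
  else if cellZ grid p.1 p.2 = 0 then (s.1, s.2.1, s.2.2 + 1)
  else s

def stepCD (grid : List (List Int)) (s : List (Int × Int) × PySem.Dict (Int × Int) Int)
    (p : Nat × Nat) : List (Int × Int) × PySem.Dict (Int × Int) Int :=
  if cellZ grid p.1 p.2 ≠ -1 ∧ cellZ grid p.1 p.2 ≠ 2 then
    (s.1 ++ [castp p], s.2.insert (castp p) (s.1.length : Int))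
  else s

def stepB (grid : List (List Int))
    (s : Int × Int × Int × List (Int × Int) × PySem.Dict (Int × Int) Int) (p : Nat × Nat) :
    Int × Int × Int × List (Int × Int) × PySem.Dict (Int × Int) Int :=
  let v := cellZ grid p.1 p.2
  let sx := if v = 1 then (p.1 : Int) else s.1
  let sy := if v = 1 then (p.2 : Int) else s.2.1
  let need := if v = 1 then s.2.2.1 else if v = 0 then s.2.2.1 + 1 else s.2.2.1
  if v ≠ -1 ∧ v ≠ 2 then
    (sx, sy, need, s.2.2.2.1 ++ [castp p], s.2.2.2.2.insert (castp p) (s.2.2.2.1.length : Int))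
  else (sx, sy, need, s.2.2.2.1, s.2.2.2.2)

lemma stepB_factor (grid : List (List Int)) :
    ∀ (P : List (Nat × Nat)) (x y nd : Int) (cs : List (Int × Int))
      (d : PySem.Dict (Int × Int) Int),
      P.foldl (stepB grid) (x, y, nd, cs, d)
        = ((P.foldl (stepA grid) (x, y, nd)).1, (P.foldl (stepA grid) (x, y, nd)).2.1,
           (P.foldl (stepA grid) (x, y, nd)).2.2,
           (P.foldl (stepCD grid) (cs, d)).1, (P.foldl (stepCD grid) (cs, d)).2) := by
  intro P
  induction P with
  | nil => intro x y nd cs d; rfl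
  | cons p P ih =>
    intro x y nd cs d
    simp only [List.foldl_cons]
    have hB : stepB grid (x, y, nd, cs, d) p
        = ((stepA grid (x, y, nd) p).1, (stepA grid (x, y, nd) p).2.1,
           (stepA grid (x, y, nd) p).2.2,
           (stepCD grid (cs, d) p).1, (stepCD grid (cs, d) p).2) := by
      simp only [stepB, stepA, stepCD]
      split_ifs <;> simp_all
    rw [hB, ih]

lemma stepA_shift (grid : List (List Int)) :
    ∀ (P : List (Nat × Nat)) (x y t : Int),
      P.foldl (stepA grid) (x, y, t + 1)
        = ((P.foldl (stepA grid) (x, y, t)).1, (P.foldl (stepA grid) (x, y, t)).2.1,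
           (P.foldl (stepA grid) (x, y, t)).2.2 + 1) := by
  intro P
  induction P with
  | nil => intro x y t; rfl
  | cons p P ih =>
    intro x y t
    simp only [List.foldl_cons, stepA]
    split_ifs with h1 h2
    · exact ih _ _ _
    · have := ih x y (t + 1)
      simpa using this
    · exact ih _ _ _

lemma stepA_state (grid : List (List Int)) (m' n' : Nat) :
    ∀ (P : List (Nat × Nat)) (s : Int × Int × Int),
      (∀ p ∈ P, p.1 < m' ∧ p.2 < n') → 0 ≤ s.2.2 →
      0 ≤ (P.foldl (stepA grid) s).2.2 ∧
      (((P.foldl (stepA grid) s).1, (P.foldl (stepA grid) s).2.1) = (s.1, s.2.1) ∨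
        (0 ≤ (P.foldl (stepA grid) s).1 ∧ (P.foldl (stepA grid) s).1 < (m' : Int) ∧
         0 ≤ (P.foldl (stepA grid) s).2.1 ∧ (P.foldl (stepA grid) s).2.1 < (n' : Int))) := by
  intro P
  induction P with
  | nil => intro s _ h; exact ⟨h, Or.inl rfl⟩
  | cons p P ih =>
    intro s hP hs
    simp only [List.foldl_cons]
    have hp := hP p (List.mem_cons_self)
    have hP' : ∀ q ∈ P, q.1 < m' ∧ q.2 < n' := fun q hq => hP q (List.mem_cons_of_mem _ hq)
    have hstep : 0 ≤ (stepA grid s p).2.2 ∧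
        (((stepA grid s p).1, (stepA grid s p).2.1) = (s.1, s.2.1) ∨
          (0 ≤ (stepA grid s p).1 ∧ (stepA grid s p).1 < (m' : Int) ∧
           0 ≤ (stepA grid s p).2.1 ∧ (stepA grid s p).2.1 < (n' : Int))) := by
      simp only [stepA]
      split_ifs
      · exact ⟨by simpa using hs, Or.inr (by simp [Nat.cast_lt, hp.1, hp.2])⟩
      · exact ⟨by simp; omega, Or.inl rfl⟩
      · exact ⟨hs, Or.inl rfl⟩
    obtain ⟨h1, h2⟩ := ih (stepA grid s p) hP' hstep.1
    refine ⟨h1, ?_⟩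
    rcases h2 with h2 | h2
    · rcases hstep.2 with h3 | h3
      · exact Or.inl (h2.trans h3)
      · simp only [Prod.mk.injEq] at h2
        rw [h2.1, h2.2]
        exact Or.inr h3
    · exact Or.inr h2

def cellsOf (grid : List (List Int)) (P : List (Nat × Nat)) : List (Int × Int) :=
  (P.filter (fun p => decide (cellZ grid p.1 p.2 ≠ -1 ∧ cellZ grid p.1 p.2 ≠ 2))).map castp

lemma mem_cellsOf {grid : List (List Int)} {P : List (Nat × Nat)} {q : Int × Int} :
    q ∈ cellsOf grid P ↔
      ∃ p ∈ P, castp p = q ∧ cellZ grid p.1 p.2 ≠ -1 ∧ cellZ grid p.1 p.2 ≠ 2 := by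
  unfold cellsOf
  simp only [List.mem_map, List.mem_filter, decide_eq_true_eq]
  constructor
  · intro ⟨p, ⟨hp, hw⟩, he⟩; exact ⟨p, hp, he, hw⟩
  · intro ⟨p, hp, he, hw⟩; exact ⟨p, ⟨hp, hw⟩, he⟩

lemma stepCD_char (grid : List (List Int)) :
    ∀ (P : List (Nat × Nat)), (P.map castp).Nodup →
      (P.foldl (stepCD grid) ([], PySem.Dict.empty)).1 = cellsOf grid P ∧
      (P.foldl (stepCD grid) ([], PySem.Dict.empty)).2.keys = cellsOf grid P ∧
      ∀ (t : Nat) (q : Int × Int), (cellsOf grid P)[t]? = some q →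
        (P.foldl (stepCD grid) ([], PySem.Dict.empty)).2.get? q = some (t : Int) := by
  intro P
  induction P using List.reverseRecOn with
  | nil =>
    intro _
    refine ⟨rfl, by simp [cellsOf], ?_⟩
    intro t q hq
    simp [cellsOf] at hq
  | append_singleton P p ihP =>
    intro hnd
    rw [List.map_append, List.map_singleton] at hnd
    obtain ⟨hnd', hx, hdisj⟩ := List.nodup_append.mp hnd
    have hnotin : castp p ∉ P.map castp := fun h => hdisj _ h _ (List.mem_singleton_self _) rfl
    obtain ⟨hc, hk, hg⟩ := ihP hnd'
    rw [List.foldl_append, List.foldl_cons, List.foldl_nil]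
    by_cases hw : cellZ grid ↑p.1 ↑p.2 ≠ -1 ∧ cellZ grid ↑p.1 ↑p.2 ≠ 2
    · have hcells : cellsOf grid (P ++ [p]) = cellsOf grid P ++ [castp p] := by
        simp [cellsOf, List.filter_append, hw]
      have hq_notmem : castp p ∉ cellsOf grid P := by
        intro h
        obtain ⟨r, hr, he, _⟩ := mem_cellsOf.mp h
        exact hnotin (he ▸ List.mem_map_of_mem hr)
      have hcontains :
          (P.foldl (stepCD grid) ([], PySem.Dict.empty)).2.contains (castp p) = false := by
        rw [← Bool.not_eq_true, PySem.Dict.contains_iff_mem_keys, hk]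
        exact hq_notmem
      simp only [stepCD, if_pos hw]
      refine ⟨by rw [hcells, hc], ?_, ?_⟩
      · rw [PySem.Dict.keys_insert_of_not_contains _ _ hcontains, hk, hcells]
      · intro t q hq
        rw [hcells] at hq
        have htlen : t < (cellsOf grid P).length + 1 := by
          have := List.getElem?_eq_some_iff.mp hq
          simpa using this.1
        by_cases ht : t < (cellsOf grid P).length
        · rw [List.getElem?_append_left ht] at hq
          have hqmem : q ∈ cellsOf grid P := List.mem_of_getElem? hq
          have hne : q ≠ castp p := fun h => hq_notmem (h ▸ hqmem)
          rw [PySem.Dict.get?_insert_of_ne _ _ hne, hg t q hq]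
        · have hteq : t = (cellsOf grid P).length := by omega
          subst hteq
          rw [List.getElem?_concat_length] at hq
          have hqe : q = castp p := by
            have := hq
            simp at this
            exact this.symm
          subst hqe
          rw [PySem.Dict.get?_insert_self, hc]
    · have hcells : cellsOf grid (P ++ [p]) = cellsOf grid P := by
        simp [cellsOf, List.filter_append, hw]
      simp only [stepCD, if_neg hw]
      exact ⟨by rw [hcells]; exact hc, by rw [hcells]; exact hk,
        fun t q hq => hg t q (by rwa [hcells] at hq)⟩

def bitsF (k mask : Nat) : Finset Nat := (Finset.range k).filter (fun t => mask.testBit t)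

def popc (k mask : Nat) : Nat := (bitsF k mask).card

def Vof (cells : List (Int × Int)) (mask : Nat) : Finset (Int × Int) :=
  (bitsF cells.length mask).image (fun t => cells.getD t (0, 0))

lemma mem_bitsF {k mask t : Nat} : t ∈ bitsF k mask ↔ t < k ∧ mask.testBit t := by
  simp [bitsF]

lemma testBit_one_shift (tn t : Nat) : (1 <<< tn).testBit t ↔ tn = t := by
  rw [Nat.one_shiftLeft]
  simp [Nat.testBit_two_pow]

lemma bitsF_or {k tn : Nat} (mask : Nat) (h : tn < k) :
    bitsF k (mask ||| 1 <<< tn) = insert tn (bitsF k mask) := by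
  ext t
  simp only [mem_bitsF, Finset.mem_insert, Nat.testBit_or]
  constructor
  · rintro ⟨ht, hb⟩
    rcases Bool.or_eq_true_iff.mp hb with hb | hb
    · exact Or.inr ⟨ht, hb⟩
    · exact Or.inl ((testBit_one_shift tn t).mp hb).symm
  · rintro (rfl | ⟨ht, hb⟩)
    · exact ⟨h, by simp [testBit_one_shift]⟩
    · exact ⟨ht, by simp [hb]⟩

lemma popc_le (k mask : Nat) : popc k mask ≤ k := by
  calc (bitsF k mask).card ≤ (Finset.range k).card := Finset.card_le_card (Finset.filter_subset _ _)
  _ = k := Finset.card_range k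

lemma popc_or {k tn : Nat} (mask : Nat) (h : tn < k) (hnb : ¬ mask.testBit tn) :
    popc k (mask ||| 1 <<< tn) = popc k mask + 1 := by
  unfold popc
  rw [bitsF_or mask h, Finset.card_insert_of_notMem (fun hm => hnb (mem_bitsF.mp hm).2)]

lemma bitsF_shift {k tn : Nat} (h : tn < k) : bitsF k (1 <<< tn) = {tn} := by
  ext t
  simp only [mem_bitsF, Finset.mem_singleton]
  constructor
  · rintro ⟨_, hb⟩; exact ((testBit_one_shift tn t).mp hb).symm
  · rintro rfl; exact ⟨h, by simp [testBit_one_shift]⟩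

lemma Vof_or {cells : List (Int × Int)} {tn : Nat} (mask : Nat) (h : tn < cells.length) :
    Vof cells (mask ||| 1 <<< tn) = insert (cells.getD tn (0, 0)) (Vof cells mask) := by
  unfold Vof
  rw [bitsF_or mask h, Finset.image_insert]

lemma Vof_shift {cells : List (Int × Int)} {tn : Nat} (h : tn < cells.length) :
    Vof cells (1 <<< tn) = {cells.getD tn (0, 0)} := by
  unfold Vof
  rw [bitsF_shift h, Finset.image_singleton]

lemma mem_Vof {cells : List (Int × Int)} {mask : Nat} {q : Int × Int} :
    q ∈ Vof cells mask ↔ ∃ t, t < cells.length ∧ mask.testBit t ∧ cells.getD t (0, 0) = q := by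
  unfold Vof
  simp only [Finset.mem_image, mem_bitsF]
  constructor
  · rintro ⟨t, ⟨ht, hb⟩, he⟩; exact ⟨t, ht, hb, he⟩
  · rintro ⟨t, ht, hb, he⟩; exact ⟨t, ⟨ht, hb⟩, he⟩

lemma not_mem_Vof {cells : List (Int × Int)} {mask : Nat} {tn : Nat}
    (hnd : cells.Nodup) (h : tn < cells.length) (hnb : ¬ mask.testBit tn) :
    cells.getD tn (0, 0) ∉ Vof cells mask := by
  intro hm
  obtain ⟨t, ht, hb, he⟩ := mem_Vof.mp hm
  rw [List.getD_eq_getElem _ _ ht, List.getD_eq_getElem _ _ h] at he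
  exact hnb ((List.Nodup.getElem_inj_iff hnd).mp he ▸ hb)

-- the context established by B's scan
def GoodCtx (grid : List (List Int)) (m n : Int) (cells : List (Int × Int))
    (index : PySem.Dict (Int × Int) Int) : Prop :=
  cells.Nodup ∧
  (∀ (t : Nat) (q : Int × Int), cells[t]? = some q →
    0 ≤ q.1 ∧ q.1 < m ∧ 0 ≤ q.2 ∧ q.2 < n ∧ cellZ grid q.1 q.2 ≠ -1 ∧ cellZ grid q.1 q.2 ≠ 2) ∧
  (∀ i j : Int, 0 ≤ i → i < m → 0 ≤ j → j < n → cellZ grid i j ≠ -1 → cellZ grid i j ≠ 2 →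
    (i, j) ∈ cells) ∧
  (∀ (t : Nat) (q : Int × Int), cells[t]? = some q → index.get? q = some (t : Int)) ∧
  index.keys = cells

def ValidKey (cells : List (Int × Int)) (c : Int) (mask : Nat) : Prop :=
  0 ≤ c ∧ c.toNat < cells.length ∧ mask.testBit c.toNat ∧
  ∀ t, mask.testBit t → t < cells.length

-- what B's f(c, mask, ·) computes: the four-direction sum of F from cells[c]
noncomputable def GF (grid : List (List Int)) (m n need : Int) (cells : List (Int × Int))
    (c : Int) (mask : Nat) : Int :=
  let q := cells.getD c.toNat (0, 0)
  let L : Int := need - (popc cells.length mask : Int) + 1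
  F grid m n (Vof cells mask) (q.1 - 1) q.2 (L - 1) +
  F grid m n (Vof cells mask) q.1 (q.2 + 1) (L - 1) +
  F grid m n (Vof cells mask) (q.1 + 1) q.2 (L - 1) +
  F grid m n (Vof cells mask) q.1 (q.2 - 1) (L - 1)

def MemoOK (grid : List (List Int)) (m n need : Int) (cells : List (Int × Int))
    (memo : PySem.Dict (Int × Nat) Int) : Prop :=
  ∀ (c : Int) (mask : Nat) (v : Int), memo.get? (c, mask) = some v →
    v = GF grid m n need cells c mask

lemma F_step_GF {grid : List (List Int)} {m n need : Int} {cells : List (Int × Int)}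
    {index : PySem.Dict (Int × Int) Int} (hctx : GoodCtx grid m n cells index)
    {tn : Nat} {mask : Nat}
    (htn : tn < cells.length) (hnb : ¬ mask.testBit tn)
    (hbits : ∀ t, mask.testBit t → t < cells.length) :
    F grid m n (Vof cells mask) (cells.getD tn (0, 0)).1 (cells.getD tn (0, 0)).2
        (need - (popc cells.length (mask ||| 1 <<< tn) : Int) + 1)
      = GF grid m n need cells (tn : Int) (mask ||| 1 <<< tn) := by
  obtain ⟨hnd, hcs, hcomp, hidx, hkeys⟩ := hctx
  have hq : cells[tn]? = some (cells.getD tn (0, 0)) := by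
    rw [List.getD_eq_getElem _ _ htn]
    exact List.getElem?_eq_some_iff.mpr ⟨htn, rfl⟩
  obtain ⟨h1, h2, h3, h4, h5, h6⟩ := hcs tn _ hq
  have hin : ¬((cells.getD tn (0, 0)).1 < 0 ∨ m ≤ (cells.getD tn (0, 0)).1 ∨
      (cells.getD tn (0, 0)).2 < 0 ∨ n ≤ (cells.getD tn (0, 0)).2) := by omega
  have hnv : cells.getD tn (0, 0) ∉ Vof cells mask := not_mem_Vof hnd htn hnb
  have hnb2 : ¬(cellZ grid (cells.getD tn (0, 0)).1 (cells.getD tn (0, 0)).2 = -1 ∨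
      ((cells.getD tn (0, 0)).1, (cells.getD tn (0, 0)).2) ∈ Vof cells mask) := by
    rintro (h | h)
    · exact h5 h
    · exact hnv (by rwa [Prod.mk.eta] at h)
  rw [F_step hin hnb2 h6]
  simp only [Prod.mk.eta]
  rw [← Vof_or mask htn]
  unfold GF
  simp only [Int.toNat_natCast]

lemma fB_eq {grid : List (List Int)} {m n need : Int} {cells : List (Int × Int)}
    {index : PySem.Dict (Int × Int) Int} (hctx : GoodCtx grid m n cells index) :
    ∀ (fuel : Nat) (memo : PySem.Dict (Int × Nat) Int) (c : Int) (mask : Nat) (left : Int),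
      MemoOK grid m n need cells memo →
      ValidKey cells c mask →
      left = need - (popc cells.length mask : Int) + 1 →
      cells.length - popc cells.length mask < fuel →
      (fB grid m n cells index fuel memo c mask left).1 = GF grid m n need cells c mask ∧
      MemoOK grid m n need cells (fB grid m n cells index fuel memo c mask left).2 := by
  intro fuel
  induction fuel with
  | zero => intro memo c mask left _ _ _ h; omega
  | succ fuel ih =>
    intro memo c mask left hmemo hvalid hleft hfuel
    obtain ⟨hc0, hclen, hcbit, hbits⟩ := hvalid
    have hstep : ∀ (d : Int × Int) (s : Int × PySem.Dict (Int × Nat) Int),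
        MemoOK grid m n need cells s.2 →
        (fBbody grid m n index (fB grid m n cells index fuel)
            (cells.getD c.toNat (0, 0)) mask left s d).1
          = s.1 + F grid m n (Vof cells mask) ((cells.getD c.toNat (0, 0)).1 + d.1)
              ((cells.getD c.toNat (0, 0)).2 + d.2) (left - 1) ∧
        MemoOK grid m n need cells
          (fBbody grid m n index (fB grid m n cells index fuel)
            (cells.getD c.toNat (0, 0)) mask left s d).2 := by
      have hctx' := hctx
      obtain ⟨hnd, hcs, hcomp, hidx, hkeys⟩ := hctx'
      intro d s hs
      set q := cells.getD c.toNat (0, 0) with hqd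
      simp only [fBbody]
      by_cases hinr : 0 ≤ q.1 + d.1 ∧ q.1 + d.1 < m ∧ 0 ≤ q.2 + d.2 ∧ q.2 + d.2 < n
      · rw [if_pos hinr]
        by_cases hv2 : cellZ grid (q.1 + d.1) (q.2 + d.2) = 2
        · rw [if_pos hv2]
          have hnb2 : ¬(cellZ grid (q.1 + d.1) (q.2 + d.2) = -1 ∨
              (q.1 + d.1, q.2 + d.2) ∈ Vof cells mask) := by
            rintro (h | h)
            · rw [hv2] at h; norm_num at h
            · obtain ⟨t, ht, hb, he⟩ := mem_Vof.mp h
              have hq' : cells[t]? = some (cells.getD t (0, 0)) := by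
                rw [List.getD_eq_getElem _ _ ht]
                exact List.getElem?_eq_some_iff.mpr ⟨ht, rfl⟩
              have h2 := (hcs t _ hq').2.2.2.2.2
              rw [he] at h2
              exact h2 hv2
          have hF := F_two (m := m) (n := n) (V := Vof cells mask) (i := q.1 + d.1)
            (j := q.2 + d.2) (left := left - 1) (by omega) hnb2 hv2
          by_cases hl : left ≤ 1
          · rw [if_pos hl]
            refine ⟨?_, hs⟩
            rw [hF, if_neg (by omega)]
          · rw [if_neg hl]
            refine ⟨?_, hs⟩
            rw [hF, if_pos (by omega), add_zero]
        · rw [if_neg hv2]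
          cases hidxq : index.get? (q.1 + d.1, q.2 + d.2) with
          | none =>
            refine ⟨?_, hs⟩
            have hneg : cellZ grid (q.1 + d.1) (q.2 + d.2) = -1 := by
              by_contra hne
              have hmem : (q.1 + d.1, q.2 + d.2) ∈ cells :=
                hcomp _ _ (by omega) (by omega) (by omega) (by omega) hne hv2
              have hnk : (q.1 + d.1, q.2 + d.2) ∉ index.keys :=
                (PySem.Dict.get?_eq_none_iff_not_mem_keys _ _).mp hidxq
              rw [hkeys] at hnk
              exact hnk hmem
            rw [F_blocked (Or.inl hneg), add_zero]
          | some t =>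
            have hmemk : (q.1 + d.1, q.2 + d.2) ∈ cells := by
              have hcont : index.contains (q.1 + d.1, q.2 + d.2) = true := by
                rw [PySem.Dict.contains_eq_isSome_get?, hidxq]
                rfl
              rw [← hkeys]
              exact (PySem.Dict.contains_iff_mem_keys _ _).mp hcont
            obtain ⟨tn, hq'⟩ := List.getElem?_of_mem hmemk
            have htn : tn < cells.length := (List.getElem?_eq_some_iff.mp hq').1
            have hteq : t = (tn : Int) := by
              have h0 := hidx tn _ hq'
              rw [hidxq] at h0
              exact Option.some_inj.mp h0
            have hgetd : cells.getD tn (0, 0) = (q.1 + d.1, q.2 + d.2) := by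
              rw [List.getD_eq_getElem _ _ htn]
              obtain ⟨hh, he⟩ := List.getElem?_eq_some_iff.mp hq'
              exact he
            rw [hteq]
            simp only [Int.toNat_natCast]
            by_cases hbit : mask.testBit tn
            · rw [if_pos hbit]
              refine ⟨?_, hs⟩
              have hmemV : (q.1 + d.1, q.2 + d.2) ∈ Vof cells mask :=
                mem_Vof.mpr ⟨tn, htn, hbit, hgetd⟩
              rw [F_blocked (Or.inr hmemV), add_zero]
            · rw [if_neg hbit]
              have hpopc := popc_or mask htn hbit
              have hvalid' : ValidKey cells (tn : Int) (mask ||| 1 <<< tn) := by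
                refine ⟨Int.natCast_nonneg tn, by rw [Int.toNat_natCast]; exact htn,
                  by rw [Int.toNat_natCast, Nat.testBit_or]
                     simp [Nat.one_shiftLeft, Nat.testBit_two_pow], ?_⟩
                intro t' hb'
                rw [Nat.testBit_or] at hb'
                rcases Bool.or_eq_true_iff.mp hb' with h | h
                · exact hbits t' h
                · rw [← (testBit_one_shift tn t').mp h]
                  exact htn
              have hleft' : left - 1 = need - (popc cells.length (mask ||| 1 <<< tn) : Int) + 1 := by
                rw [hpopc]
                push_cast
                omega
              have hfuel' : cells.length - popc cells.length (mask ||| 1 <<< tn) < fuel := by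
                have h1 := popc_le cells.length (mask ||| 1 <<< tn)
                omega
              obtain ⟨hp1, hp2⟩ :=
                ih s.2 (tn : Int) (mask ||| 1 <<< tn) (left - 1) hs hvalid' hleft' hfuel'
              refine ⟨?_, hp2⟩
              rw [hp1, ← F_step_GF hctx htn hbit hbits, hgetd, ← hleft']
              norm_num
      · rw [if_neg hinr]
        refine ⟨?_, hs⟩
        rw [F_out (by omega), add_zero]
    have hfold : ∀ (ds : List (Int × Int)) (s : Int × PySem.Dict (Int × Nat) Int),
        MemoOK grid m n need cells s.2 →
        (ds.foldl (fBbody grid m n index (fB grid m n cells index fuel)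
            (cells.getD c.toNat (0, 0)) mask left) s).1
          = s.1 + (ds.map (fun d => F grid m n (Vof cells mask)
              ((cells.getD c.toNat (0, 0)).1 + d.1)
              ((cells.getD c.toNat (0, 0)).2 + d.2) (left - 1))).sum ∧
        MemoOK grid m n need cells
          (ds.foldl (fBbody grid m n index (fB grid m n cells index fuel)
            (cells.getD c.toNat (0, 0)) mask left) s).2 := by
      intro ds
      induction ds with
      | nil => intro s hs; exact ⟨by simp, hs⟩
      | cons d ds ihd =>
        intro s hs
        obtain ⟨e0, m0⟩ := hstep d s hs
        obtain ⟨e1, m1⟩ := ihd _ m0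
        rw [List.foldl_cons, List.map_cons, List.sum_cons]
        exact ⟨by rw [e1, e0]; ring, m1⟩
    have hGF : ((0 : Int) + (dirListB.map (fun d => F grid m n (Vof cells mask)
          ((cells.getD c.toNat (0, 0)).1 + d.1)
          ((cells.getD c.toNat (0, 0)).2 + d.2) (left - 1))).sum)
        = GF grid m n need cells c mask := by
      simp only [dirListB, List.map_cons, List.map_nil, List.sum_cons, List.sum_nil]
      unfold GF
      rw [hleft]
      norm_num
      ring_nf
    rw [fB]
    cases hget : memo.get? (c, mask) with
    | some v => exact ⟨hmemo c mask v hget, hmemo⟩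
    | none =>
      have hr1 := ((hfold dirListB (0, memo) hmemo).1).trans hGF
      have hmok := (hfold dirListB (0, memo) hmemo).2
      refine ⟨hr1, ?_⟩
      intro c' mask' v hv
      rw [PySem.Dict.get?_insert] at hv
      by_cases he : (c', mask') = (c, mask)
      · rw [if_pos he] at hv
        have h1 : c' = c := (Prod.ext_iff.mp he).1
        have h2 : mask' = mask := (Prod.ext_iff.mp he).2
        rw [h1, h2, ← hr1]
        injection hv with hv
        exact hv.symm
      · rw [if_neg he] at hv
        exact hmok c' mask' v hv

lemma popc_shift {k tn : Nat} (h : tn < k) : popc k (1 <<< tn) = 1 := by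
  unfold popc
  rw [bitsF_shift h, Finset.card_singleton]

lemma uniquePathsIII_eq (grid : List (List Int)) :
    uniquePathsIII grid = (dfsA (grid.length : Int) ((grid.headD []).length : Int)
      (grid.length * (grid.headD []).length + 1) grid
      ((pairsL grid.length (grid.headD []).length).foldl (stepA grid) (0, 0, 0)).1
      ((pairsL grid.length (grid.headD []).length).foldl (stepA grid) (0, 0, 0)).2.1
      (((pairsL grid.length (grid.headD []).length).foldl (stepA grid) (0, 0, 0)).2.2 + 1)).1 := by
  unfold uniquePathsIII
  rw [foldl_nested (scanStepA grid)]
  rfl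

lemma scanB_eq (grid : List (List Int)) :
    scanB grid = (pairsL grid.length (grid.headD []).length).foldl (stepB grid)
      ((0:Int), (0:Int), (1:Int), ([] : List (Int × Int)), PySem.Dict.empty) := by
  unfold scanB
  rw [foldl_nested (scanStepB grid)]
  rfl

lemma main_eq (grid : List (List Int)) (_hne : grid ≠ [])
    (hrowlen : ∀ row ∈ grid, (grid.headD []).length ≤ row.length) :
    uniquePathsIII grid = uniquePathsIII_alt grid := by
  have hrows : ∀ r : Nat, r < grid.length →
      (((grid.headD []).length : Int)) ≤ ((grid.getD r []).length : Int) := by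
    intro r hr
    have hmem : grid.getD r [] ∈ grid := by
      rw [List.getD_eq_getElem _ _ hr]
      exact List.getElem_mem _
    exact_mod_cast hrowlen _ hmem
  set m : Int := (grid.length : Int) with hm
  set n : Int := ((grid.headD []).length : Int) with hn
  set P := pairsL grid.length (grid.headD []).length with hP
  set S := P.foldl (stepA grid) ((0:Int), (0:Int), (0:Int)) with hS
  set CD := P.foldl (stepCD grid)
    (([] : List (Int × Int)), (PySem.Dict.empty : PySem.Dict (Int × Int) Int)) with hCD
  set cells := cellsOf grid P with hcells
  have hPnd : (P.map castp).Nodup := List.Nodup.map castp_inj (pairsL_nodup _ _)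
  obtain ⟨hc, hk, hg⟩ := stepCD_char grid P hPnd
  rw [← hCD] at hc hk
  rw [← hcells] at hc hk
  have hg' : ∀ (t : Nat) (q : Int × Int), cells[t]? = some q → CD.2.get? q = some (t : Int) := by
    intro t q hq
    rw [hCD]
    exact hg t q (by rwa [hcells] at hq)
  clear hg
  have hctx : GoodCtx grid m n cells CD.2 := by
    refine ⟨?_, ?_, ?_, hg', hk⟩
    · rw [hcells]
      exact List.Nodup.sublist (List.Sublist.map castp List.filter_sublist) hPnd
    · intro t q hq
      have hmemq := List.mem_of_getElem? hq
      rw [hcells] at hmemq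
      obtain ⟨p, hp, he, hw1, hw2⟩ := mem_cellsOf.mp hmemq
      obtain ⟨hp1, hp2⟩ := mem_pairsL.mp hp
      subst he
      refine ⟨by simp [castp], by simp only [castp]; rw [hm]; exact_mod_cast hp1,
        by simp [castp], by simp only [castp]; rw [hn]; exact_mod_cast hp2, hw1, hw2⟩
    · intro i j hi him hj hjn hw1 hw2
      rw [hcells]
      apply mem_cellsOf.mpr
      have hci : ((i.toNat : Int)) = i := Int.toNat_of_nonneg hi
      have hcj : ((j.toNat : Int)) = j := Int.toNat_of_nonneg hj
      refine ⟨(i.toNat, j.toNat), mem_pairsL.mpr ⟨by omega, by omega⟩, ?_, ?_, ?_⟩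
      · simp only [castp]
        rw [hci, hcj]
      · simpa only [hci, hcj] using hw1
      · simpa only [hci, hcj] using hw2
  have hsprop := stepA_state grid grid.length (grid.headD []).length P
    ((0:Int), (0:Int), (0:Int)) (fun p hp => mem_pairsL.mp hp) (by norm_num)
  rw [← hS, ← hm, ← hn] at hsprop
  norm_num at hsprop
  have hA : uniquePathsIII grid = F grid m n ∅ S.1 S.2.1 (S.2.2 + 1) := by
    rw [uniquePathsIII_eq]
    have hrel : RelG grid grid m n ∅ := ⟨rfl, fun r => rfl, fun i j _ _ _ _ =>
      ⟨fun h => absurd h (Finset.notMem_empty _), fun _ => ⟨Iff.rfl, Iff.rfl⟩⟩⟩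
    have hcard : (walkSet grid m n \ ∅).card < grid.length * (grid.headD []).length + 1 := by
      rw [Finset.sdiff_empty]
      have h1 : (walkSet grid m n).card ≤
          ((Finset.Icc (0:Int) (m-1)) ×ˢ (Finset.Icc (0:Int) (n-1))).card :=
        Finset.card_filter_le _ _
      rw [Finset.card_product, Int.card_Icc, Int.card_Icc] at h1
      have h2 : (m - 1 + 1 - 0).toNat = grid.length := by omega
      have h3 : (n - 1 + 1 - 0).toNat = (grid.headD []).length := by omega
      rw [h2, h3] at h1
      omega
    exact (dfsA_eq grid m n rfl hrows (grid.length * (grid.headD []).length + 1) ∅ grid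
      S.1 S.2.1 (S.2.2 + 1) hrel hcard).1
  have hBs : scanB grid = (S.1, S.2.1, S.2.2 + 1, CD.1, CD.2) := by
    rw [scanB_eq, stepB_factor,
      (by norm_num : ((0:Int), (0:Int), (1:Int)) = ((0:Int), (0:Int), (0:Int) + 1)),
      stepA_shift grid P 0 0 0]
  have halt : uniquePathsIII_alt grid = (match CD.2.get? (S.1, S.2.1) with
      | none => (0 : Int)
      | some st => (fB grid m n CD.1 CD.2 (CD.1.length + 1) PySem.Dict.empty st
          (1 <<< st.toNat) (S.2.2 + 1)).1) := by
    unfold uniquePathsIII_alt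
    rw [hBs]
  rw [hA, halt]
  cases hstart : CD.2.get? (S.1, S.2.1) with
  | none =>
    show F grid m n ∅ S.1 S.2.1 (S.2.2 + 1) = 0
    by_cases hout : S.1 < 0 ∨ m ≤ S.1 ∨ S.2.1 < 0 ∨ n ≤ S.2.1
    · rw [F_out hout]
    · have hnotmem : (S.1, S.2.1) ∉ cells := by
        have h0 := (PySem.Dict.get?_eq_none_iff_not_mem_keys _ _).mp hstart
        rwa [hk] at h0
      have hcases : cellZ grid S.1 S.2.1 = -1 ∨ cellZ grid S.1 S.2.1 = 2 := by
        by_contra hcon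
        push Not at hcon
        exact hnotmem (hctx.2.2.1 S.1 S.2.1 (by omega) (by omega) (by omega) (by omega)
          hcon.1 hcon.2)
      rcases hcases with h | h
      · rw [F_blocked (Or.inl h)]
      · rw [F_two hout ?_ h, if_pos (by omega)]
        rintro (hh | hh)
        · rw [h] at hh; norm_num at hh
        · exact absurd hh (Finset.notMem_empty _)
  | some st =>
    show F grid m n ∅ S.1 S.2.1 (S.2.2 + 1) = (fB grid m n CD.1 CD.2 (CD.1.length + 1)
      PySem.Dict.empty st (1 <<< st.toNat) (S.2.2 + 1)).1
    have hmemk : (S.1, S.2.1) ∈ cells := by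
      have hcont : CD.2.contains (S.1, S.2.1) = true := by
        rw [PySem.Dict.contains_eq_isSome_get?, hstart]
        rfl
      rw [← hk]
      exact (PySem.Dict.contains_iff_mem_keys _ _).mp hcont
    obtain ⟨tn, hq'⟩ := List.getElem?_of_mem hmemk
    have htn : tn < cells.length := (List.getElem?_eq_some_iff.mp hq').1
    have hteq : st = (tn : Int) := by
      have h0 := hg' tn _ hq'
      rw [hstart] at h0
      exact Option.some_inj.mp h0
    have hgetd : cells.getD tn (0, 0) = (S.1, S.2.1) := by
      rw [List.getD_eq_getElem _ _ htn]
      obtain ⟨hh, he⟩ := List.getElem?_eq_some_iff.mp hq'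
      exact he
    obtain ⟨hb1, hb2, hb3, hb4, hw1, hw2⟩ := hctx.2.1 tn _ hq'
    norm_num at hb1 hb2 hb3 hb4 hw1 hw2
    rw [hc, hteq]
    simp only [Int.toNat_natCast]
    have hmemo0 : MemoOK grid m n (S.2.2 + 1) cells PySem.Dict.empty := by
      intro a b v hv
      rw [PySem.Dict.get?_empty] at hv
      cases hv
    have hvalid0 : ValidKey cells (tn : Int) (1 <<< tn) := by
      refine ⟨Int.natCast_nonneg tn, by rw [Int.toNat_natCast]; exact htn,
        by rw [Int.toNat_natCast]; simp [Nat.one_shiftLeft], ?_⟩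
      intro t' hb'
      rw [← (testBit_one_shift tn t').mp hb']
      exact htn
    have hleft0 : S.2.2 + 1 = (S.2.2 + 1) - (popc cells.length (1 <<< tn) : Int) + 1 := by
      rw [popc_shift htn]
      push_cast
      ring
    have hfuel0 : cells.length - popc cells.length (1 <<< tn) < cells.length + 1 := by omega
    obtain ⟨hfb, -⟩ := fB_eq hctx (cells.length + 1) PySem.Dict.empty (tn : Int) (1 <<< tn)
      (S.2.2 + 1) hmemo0 hvalid0 hleft0 hfuel0
    rw [hfb]
    have hout2 : ¬(S.1 < 0 ∨ m ≤ S.1 ∨ S.2.1 < 0 ∨ n ≤ S.2.1) := by omega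
    have hnb2 : ¬(cellZ grid S.1 S.2.1 = -1 ∨ (S.1, S.2.1) ∈ (∅ : Finset (Int × Int))) := by
      rintro (hh | hh)
      · exact hw1 hh
      · exact absurd hh (Finset.notMem_empty _)
    rw [F_step hout2 hnb2 hw2]
    unfold GF
    simp only [Int.toNat_natCast]
    rw [hgetd, Vof_shift htn, hgetd, popc_shift htn]
    norm_num

-- ===== VERDICT (by name: the statement is the Claim_ definition above) =====
theorem uniquePathsIII_spec : Claim_equal_uniquePathsIII := by
  intro grid _ hpre
  unfold Spec_uniquePathsIII
  exact main_eq grid hpre.1 hpre.2
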